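-- pv_equiv track=rewrite | github.com/PrinceSinghhub/GFG-Questions | Reversing the equation.py | reverseEqn
-- ===== SOURCE A (Python) =====
-- def reverseEqn(s):
--
--     s1=''
--
--     l=list(s)
--
--     l1=['+','-','*','/']
--
--
--
--     s2=''
--
--     s3=''
--
--     while l:
--
--         a=l.pop()
--
--         if a in l1:
--
--             s3+=s2[::-1]
--
--             s3+=a
--
--             s2=''
--
--
--
--         else:
--
--             s2+=a
--
--     s3+=s2[::-1]
--
--     return s3
-- ===== SOURCE B (Python) =====
-- def reverseEqn(s):
--     parts = ['']
--     for c in s: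
--         if c in '+-*/':
--             parts += [c, '']
--         else:
--             parts[-1] += c
--     return ''.join(reversed(parts))
-- ===== Notes on version B (the rewrite author's own statement) =====
-- stated objective: simpler
-- what changed: B tokenizes the string in one forward pass into an alternating list of number/operator tokens (keeping empty tokens) and joins the reversed token list, instead of A's backward character-pop loop that flushes a reversed pending buffer at each operator.
import Mathlib
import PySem

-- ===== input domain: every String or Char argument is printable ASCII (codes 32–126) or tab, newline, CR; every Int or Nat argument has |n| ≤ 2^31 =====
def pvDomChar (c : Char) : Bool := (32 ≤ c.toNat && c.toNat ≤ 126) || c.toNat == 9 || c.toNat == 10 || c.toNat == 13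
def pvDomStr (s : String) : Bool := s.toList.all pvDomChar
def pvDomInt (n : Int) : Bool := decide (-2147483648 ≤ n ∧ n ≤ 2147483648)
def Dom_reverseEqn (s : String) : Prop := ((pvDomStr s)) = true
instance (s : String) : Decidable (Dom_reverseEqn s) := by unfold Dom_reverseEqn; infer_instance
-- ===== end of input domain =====

-- B tokenizes in one forward pass into an alternating number/operator token list (keeping empties)
-- and joins the reversed list, instead of A's backward character-pop loop with a reversed flush buffer.

-- ===== PORT A =====
-- l1 = ['+','-','*','/']
def pvL1 : List Char := ['+', '-', '*', '/']

-- the 'while l: a = l.pop(); …' loop pops characters from the END of l; it is transcribed as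
-- structural recursion over the REVERSED character list (strings handled as their char lists;
-- s2[::-1] is the exact reversal, ported as List.reverse).
def reverseEqnGo : List Char → List Char → List Char → List Char
  | [], s2, s3 => s3 ++ s2.reverse            -- loop ended: s3 += s2[::-1]
  | a :: rest, s2, s3 =>
      if pvL1.contains a then reverseEqnGo rest [] (s3 ++ s2.reverse ++ [a])
      else reverseEqnGo rest (s2 ++ [a]) s3

def reverseEqn (s : String) : String :=
  String.ofList (reverseEqnGo s.toList.reverse [] [])

-- ===== PORT B =====
-- c in '+-*/'
def pvOps : List Char := "+-*/".toList

-- one step of B's forward loop over the characters; parts[-1] += c is ported exactly with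
-- dropLast / getLastD (parts is never empty, so the default is never used).
def altStep (parts : List (List Char)) (c : Char) : List (List Char) :=
  if pvOps.contains c then parts ++ [[c], []]          -- parts += [c, '']
  else parts.dropLast ++ [(parts.getLastD []).concat c] -- parts[-1] += c

def reverseEqn_alt (s : String) : String :=
  String.ofList ((s.toList.foldl altStep [[]]).reverse).flatten  -- ''.join(reversed(parts))

-- ===== PRECONDITION & SPEC =====
def Spec_reverseEqn (s : String) (out : String) : Prop := out = reverseEqn_alt s
instance (s : String) (out : String) : Decidable (Spec_reverseEqn s out) := by unfold Spec_reverseEqn; infer_instance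

-- ===== CLAIM (what is proved, stated in full; the proofs are below) =====
def Claim_equal_reverseEqn : Prop := ∀ (s : String), Dom_reverseEqn s → Spec_reverseEqn s (reverseEqn s)

-- ===== LEMMAS AND PROOFS =====

-- common specification: the alternating token list of a char list (first-class version of
-- B's tokenisation), numbers and operators alternating, empty tokens kept.
def splitTokCons (c : Char) : List (List Char) → List (List Char)
  | [] => [[]]          -- unreachable: splitTok never returns []
  | p :: ps => if c ∈ pvOps then [] :: [c] :: p :: ps else (c :: p) :: ps

def splitTok : List Char → List (List Char)
  | [] => [[]]
  | c :: cs => splitTokCons c (splitTok cs)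

theorem splitTok_ne_nil (l : List Char) : splitTok l ≠ [] := by
  cases l with
  | nil => simp [splitTok]
  | cons c cs =>
      simp only [splitTok]
      cases splitTok cs with
      | nil => simp [splitTokCons]
      | cons p ps =>
          simp only [splitTokCons]
          by_cases hc : c ∈ pvOps <;> simp [hc]

theorem splitTok_opfree (ys : List Char) (h : ∀ c ∈ ys, c ∉ pvOps) :
    splitTok ys = [ys] := by
  induction ys with
  | nil => rfl
  | cons c cs ih =>
      have hc : c ∉ pvOps := h c (by simp)
      have hcs : splitTok cs = [cs] := ih (fun d hd => h d (by simp [hd]))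
      simp [splitTok, hcs, splitTokCons, hc]

theorem splitTok_append_op (xs ys : List Char) (a : Char)
    (ha : a ∈ pvOps) (hys : ∀ c ∈ ys, c ∉ pvOps) :
    splitTok (xs ++ a :: ys) = splitTok xs ++ [[a], ys] := by
  induction xs with
  | nil => simp [splitTok, splitTokCons, splitTok_opfree ys hys, ha]
  | cons c cs ih =>
      simp only [List.cons_append, splitTok, ih]
      cases h : splitTok cs with
      | nil => exact absurd h (splitTok_ne_nil cs)
      | cons p ps =>
          simp only [List.cons_append, splitTokCons]
          by_cases hc : c ∈ pvOps <;> simp [hc]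

theorem dropLast_getLastD {α : Type} (l : List α) (h : l ≠ []) (d : α) :
    l.dropLast ++ [l.getLastD d] = l := by
  induction l with
  | nil => exact absurd rfl h
  | cons a t ih =>
      cases t with
      | nil => simp
      | cons b u => simpa using ih (by simp)

-- merge a pending prefix into the head token
def mergeHead (x : List Char) : List (List Char) → List (List Char)
  | [] => [x]
  | p :: ps => (x ++ p) :: ps

-- B's foldl computes splitTok (with the pending last token merged in).
theorem altFold_eq (cs : List Char) :
    ∀ parts : List (List Char), parts ≠ [] →
      cs.foldl altStep parts
        = parts.dropLast ++ mergeHead (parts.getLastD []) (splitTok cs) := by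
  induction cs with
  | nil =>
      intro parts hp
      simp only [List.foldl_nil, splitTok, mergeHead, List.append_nil]
      exact (dropLast_getLastD parts hp []).symm
  | cons c cs ih =>
      intro parts hp
      simp only [List.foldl_cons, altStep]
      by_cases hc : c ∈ pvOps
      · rw [if_pos (by simpa using hc), ih (parts ++ [[c], []]) (by simp)]
        simp only [splitTok]
        cases h : splitTok cs with
        | nil => exact absurd h (splitTok_ne_nil cs)
        | cons p ps =>
            have h1 : (parts ++ [[c], []]).dropLast = parts ++ [[c]] := by
              simp [List.dropLast_append_of_ne_nil]
            have h2 : (parts ++ [[c], []]).getLastD [] = [] := by simp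
            rw [h1, h2]
            simp only [splitTokCons, if_pos hc, mergeHead]
            rw [show parts.dropLast ++ (parts.getLastD [] ++ []) :: [c] :: p :: ps
                  = (parts.dropLast ++ [parts.getLastD []]) ++ [c] :: p :: ps by simp,
                dropLast_getLastD parts hp]
            simp
      · rw [if_neg (by simpa using hc), ih (parts.dropLast ++ [(parts.getLastD []).concat c]) (by simp)]
        simp only [splitTok]
        cases h : splitTok cs with
        | nil => exact absurd h (splitTok_ne_nil cs)
        | cons p ps =>
            have h1 : (parts.dropLast ++ [(parts.getLastD []).concat c]).dropLast
                = parts.dropLast := by simp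
            have h2 : (parts.dropLast ++ [(parts.getLastD []).concat c]).getLastD []
                = (parts.getLastD []).concat c := by simp
            rw [h1, h2]
            simp only [splitTokCons, if_neg hc, mergeHead, List.concat_eq_append]
            simp

theorem pvL1_eq_pvOps : pvL1 = pvOps := by decide

-- A's loop, run over the reversed input with an op-free pending buffer s2, produces the
-- reversed-token join of the original order.
theorem goA_eq (r : List Char) :
    ∀ s2 s3 : List Char, (∀ c ∈ s2, c ∉ pvOps) →
      reverseEqnGo r s2 s3 = s3 ++ ((splitTok (r.reverse ++ s2.reverse)).reverse).flatten := by
  induction r with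
  | nil =>
      intro s2 s3 h2
      have : splitTok s2.reverse = [s2.reverse] :=
        splitTok_opfree _ (fun c hc => h2 c (List.mem_reverse.mp hc))
      simp [reverseEqnGo, this]
  | cons a rest ih =>
      intro s2 s3 h2
      simp only [reverseEqnGo, List.reverse_cons, pvL1_eq_pvOps]
      by_cases ha : a ∈ pvOps
      · have hsplit : splitTok (rest.reverse ++ [a] ++ s2.reverse)
            = splitTok rest.reverse ++ [[a], s2.reverse] := by
          rw [List.append_assoc, List.singleton_append]
          exact splitTok_append_op rest.reverse s2.reverse a ha
            (fun c hc => h2 c (List.mem_reverse.mp hc))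
        rw [if_pos (by simpa using ha), ih [] _ (by simp), hsplit]
        simp
      · rw [if_neg (by simpa using ha), ih (s2 ++ [a]) s3 (by
              intro c hc
              rcases List.mem_append.mp hc with h | h
              · exact h2 c h
              · simp only [List.mem_singleton] at h; subst h; exact ha)]
        simp

-- ===== VERDICT (by name: the statement is the Claim_ definition above) =====
theorem reverseEqn_spec : Claim_equal_reverseEqn := by
  intro s _
  show reverseEqn s = reverseEqn_alt s
  unfold reverseEqn reverseEqn_alt
  rw [goA_eq s.toList.reverse [] [] (by simp),
      altFold_eq s.toList [[]] (by simp)]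
  cases h : splitTok s.toList with
  | nil => exact absurd h (splitTok_ne_nil s.toList)
  | cons p ps => simp [mergeHead, h]
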